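-- pv_equiv track=rewrite | github.com/nkh3690/pyhton_algorithm | greedy/greedy1.py | solution
-- ===== SOURCE A (Python) =====
-- from typing import List
--
-- def solution(m: int, k: int, arr: List[int]) -> int:
--     arr.sort()
--
--     first = arr[len(arr) - 1]
--     second = arr[len(arr) - 2]
--     result = 0
--
--     for i in range(1, m + 1):
--         if i % (k + 1) == 0:
--             result += second
--         else:
--             result += first
--
--     return result
-- ===== SOURCE B (Python) =====
-- def solution(m, k, arr):
--     first = max(arr)
--     rest = list(arr)
--     rest.remove(first)
--     second = max(rest)
--     total = 0
--     for i in range(1, m + 1):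
--         total += second if i % (k + 1) == 0 else first
--     return total
-- ===== Notes on version B (the rewrite author's own statement) =====
-- stated objective: alternative
-- what changed: B selects the two largest elements by linear max/remove/max scans instead of sorting the whole list, keeping the same accumulation loop; Pre_ excludes lists with fewer than two elements (A raises IndexError on [] and on a 1-element list A's arr[len-2] only works by accidental negative-index wraparound) and k = -1 with m >= 1 (A raises ZeroDivisionError).
-- outside the precondition, e.g. on solution(3, 2, [5]): A returns 15, B raises ValueError
import Mathlib
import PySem

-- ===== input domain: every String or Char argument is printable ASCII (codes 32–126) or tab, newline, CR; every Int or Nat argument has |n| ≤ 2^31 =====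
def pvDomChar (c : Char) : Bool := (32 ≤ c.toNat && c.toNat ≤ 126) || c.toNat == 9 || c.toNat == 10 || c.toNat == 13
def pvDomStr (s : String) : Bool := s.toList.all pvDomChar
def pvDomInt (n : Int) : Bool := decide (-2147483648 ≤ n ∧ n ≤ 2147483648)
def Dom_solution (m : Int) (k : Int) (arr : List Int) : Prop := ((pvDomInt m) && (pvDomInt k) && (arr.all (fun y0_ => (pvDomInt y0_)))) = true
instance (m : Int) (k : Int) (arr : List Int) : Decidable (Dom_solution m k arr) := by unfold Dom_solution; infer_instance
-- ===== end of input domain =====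

-- B selects the two largest elements by linear max/remove/max scans instead of sorting; equivalence
-- is about the return value (A sorts arr in place, B does not mutate arr).

-- ===== PORT A =====
def solution (m : Int) (k : Int) (arr : List Int) : Int :=
  let s := PySem.List.sorted arr id false
  match PySem.List.pyGet? s ((PySem.List.len s) - 1), PySem.List.pyGet? s ((PySem.List.len s) - 2) with
  | some first, some second =>
      (PySem.List.pyRange 1 (m + 1) 1).foldl
        (fun result i =>
          if PySem.Int.mod i (k + 1) == 0 then result + second else result + first) 0
  | _, _ => 0  -- IndexError (arr = []), excluded by Pre_

-- ===== PORT B =====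
def solution_alt (m : Int) (k : Int) (arr : List Int) : Int :=
  match PySem.List.max? arr (fun y => y) with
  | none => 0  -- ValueError (arr = []), excluded by Pre_
  | some first =>
    match PySem.List.remove? arr first with
    | none => 0  -- unreachable: first ∈ arr
    | some rest =>
      match PySem.List.max? rest (fun y => y) with
      | none => 0  -- ValueError (len arr < 2), excluded by Pre_
      | some second =>
        (PySem.List.pyRange 1 (m + 1) 1).foldl
          (fun total i =>
            total + (if PySem.Int.mod i (k + 1) == 0 then second else first)) 0

-- ===== PRECONDITION & SPEC =====
-- Pre_ excludes lists with fewer than two elements (A raises IndexError on [] and on a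
-- 1-element list A's arr[len-2] only works by accidental negative-index wraparound) and
-- k = -1 with m ≥ 1 (A raises ZeroDivisionError inside the loop).
def Pre_solution (m : Int) (k : Int) (arr : List Int) : Prop := 2 ≤ arr.length ∧ ¬(k = -1 ∧ 1 ≤ m)
instance (m : Int) (k : Int) (arr : List Int) : Decidable (Pre_solution m k arr) := by unfold Pre_solution; infer_instance
def pvWitness_solution : Int × Int × List Int := (7, 2, [1, 5, 3])
def Spec_solution (m : Int) (k : Int) (arr : List Int) (out : Int) : Prop := out = solution_alt m k arr
instance (m : Int) (k : Int) (arr : List Int) (out : Int) : Decidable (Spec_solution m k arr out) := by unfold Spec_solution; infer_instance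

-- ===== CLAIM (what is proved, stated in full; the proofs are below) =====
def Claim_equal_solution : Prop := ∀ (m : Int) (k : Int) (arr : List Int), Dom_solution m k arr → Pre_solution m k arr → Spec_solution m k arr (solution m k arr)

-- ===== LEMMAS AND PROOFS =====

-- a list of length ≥ 2 ends in two elements
lemma exists_two_last {α : Type} (s : List α) (h : 2 ≤ s.length) :
    ∃ t b a, s = t ++ [b, a] := by
  rcases s.eq_nil_or_concat with rfl | ⟨s1, a, rfl⟩
  · simp at h
  · rcases s1.eq_nil_or_concat with rfl | ⟨t, b, rfl⟩
    · simp at h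
    · exact ⟨t, b, a, by simp⟩

-- ===== VERDICT (by name: the statement is the Claim_ definition above) =====
theorem solution_spec : Claim_equal_solution := by
  intro m k arr _ hpre
  obtain ⟨hlen, -⟩ := hpre
  unfold Spec_solution solution solution_alt
  simp only []
  set s := PySem.List.sorted arr id false with hs
  have hslen : 2 ≤ s.length := by rw [hs, PySem.List.length_sorted]; exact hlen
  obtain ⟨t, bb, aa, hst⟩ := exists_two_last s hslen
  have hp : s.Pairwise (fun x y => id x ≤ id y) := PySem.List.sorted_pairwise arr id
  rw [hst] at hp
  rw [List.pairwise_append] at hp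
  obtain ⟨-, hba, hcross⟩ := hp
  have hble : bb ≤ aa := by
    have := List.pairwise_cons.mp hba
    simpa using this.1 aa (by simp)
  have htaa : ∀ y ∈ t, y ≤ aa := fun y hy => hcross y hy aa (by simp)
  have htbb : ∀ y ∈ t, y ≤ bb := fun y hy => hcross y hy bb (by simp)
  have hallA : ∀ y ∈ s, y ≤ aa := by
    intro y hy
    rw [hst] at hy
    rcases List.mem_append.mp hy with h | h
    · exact htaa y h
    · rcases List.mem_cons.mp h with rfl | h
      · exact hble
      · simp at h; omega
  have haamem : aa ∈ s := by rw [hst]; simp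
  have hbbmem : bb ∈ s := by rw [hst]; simp
  -- A's two indexed reads
  have hA1 : PySem.List.pyGet? s ((PySem.List.len s) - 1) = some aa := by
    have h1 : (PySem.List.len s) - 1 = (((t ++ [bb]).length : Nat) : Int) := by
      simp only [PySem.List.len_eq, hst, List.length_append, List.length_cons, List.length_nil]
      push_cast
      omega
    have h2 : s = (t ++ [bb]) ++ aa :: [] := by rw [hst]; simp
    rw [h1, h2, PySem.List.pyGet?_append_length]
  have hA2 : PySem.List.pyGet? s ((PySem.List.len s) - 2) = some bb := by
    have h1 : (PySem.List.len s) - 2 = ((t.length : Nat) : Int) := by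
      simp only [PySem.List.len_eq, hst, List.length_append, List.length_cons, List.length_nil]
      push_cast
      omega
    have h2 : s = t ++ bb :: [aa] := by rw [hst]
    rw [h1, h2, PySem.List.pyGet?_append_length]
  -- B's first scan: max(arr) is aa
  have harrne : arr ≠ [] := by intro h; rw [h] at hlen; simp at hlen
  obtain ⟨v, hv⟩ : ∃ v, PySem.List.max? arr (fun y => y) = some v := by
    cases hmx : PySem.List.max? arr (fun y => y) with
    | none => exact absurd ((PySem.List.max?_eq_none_iff _ _).mp hmx) harrne
    | some v => exact ⟨v, rfl⟩
  have hvmem : v ∈ arr := PySem.List.max?_mem hv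
  have hvs : v ∈ s := (PySem.List.mem_sorted _ _ _ _).mpr hvmem
  have haarr : aa ∈ arr := (PySem.List.mem_sorted _ _ _ _).mp haamem
  have hvaa : v = aa := le_antisymm (hallA v hvs) (PySem.List.max?_isMax hv aa haarr)
  -- B's remove: rest is arr.erase v, a permutation of s.erase v
  have hrem : PySem.List.remove? arr v = some (arr.erase v) :=
    PySem.List.remove?_eq_some_erase arr v hvmem
  have hperm : (arr.erase v).Perm (s.erase v) :=
    ((PySem.List.sorted_perm arr id false).erase v).symm
  have hrestlen : (arr.erase v).length = arr.length - 1 := List.length_erase_of_mem hvmem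
  have hrestne : arr.erase v ≠ [] := by
    intro h
    rw [h] at hrestlen
    simp at hrestlen
    omega
  -- B's second scan: max(rest) is bb
  obtain ⟨w, hw⟩ : ∃ w, PySem.List.max? (arr.erase v) (fun y => y) = some w := by
    cases hmx : PySem.List.max? (arr.erase v) (fun y => y) with
    | none => exact absurd ((PySem.List.max?_eq_none_iff _ _).mp hmx) hrestne
    | some w => exact ⟨w, rfl⟩
  have hwmem : w ∈ s.erase v := hperm.mem_iff.mp (PySem.List.max?_mem hw)
  have hwbb : w = bb := by
    subst hvaa
    by_cases hc : v ∈ t ++ [bb]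
    · -- a duplicate of the maximum sits before the last slot: then bb = v
      have hbbv : bb = v := by
        have hvle : v ≤ bb := by
          rcases List.mem_append.mp hc with h | h
          · exact htbb v h
          · simp at h; omega
        omega
      have herase : s.erase v = (t ++ [bb]).erase v ++ [v] := by
        rw [hst]
        have : t ++ [bb, v] = (t ++ [bb]) ++ [v] := by simp
        rw [this, List.erase_append_left _ hc]
      have hvrest : v ∈ arr.erase v := by
        rw [hperm.mem_iff, herase]; simp
      have hwle : w ≤ v := by
        rw [herase] at hwmem
        rcases List.mem_append.mp hwmem with h | h
        · have h' := List.mem_of_mem_erase h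
          rcases List.mem_append.mp h' with h'' | h''
          · exact le_trans (htbb w h'') (le_of_eq hbbv)
          · simp at h''; omega
        · simp at h; omega
      have hlew : v ≤ w := PySem.List.max?_isMax hw v hvrest
      omega
    · -- the maximum occurs only last: erasing it leaves t ++ [bb]
      have herase : s.erase v = t ++ [bb] := by
        rw [hst]
        have : t ++ [bb, v] = (t ++ [bb]) ++ [v] := by simp
        rw [this, List.erase_append_right _ hc]
        simp
      have hbbrest : bb ∈ arr.erase v := by
        rw [hperm.mem_iff, herase]; simp
      have hwle : w ≤ bb := by
        rw [herase] at hwmem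
        rcases List.mem_append.mp hwmem with h | h
        · exact htbb w h
        · simp at h; omega
      have hlew : bb ≤ w := PySem.List.max?_isMax hw bb hbbrest
      omega
  rw [hA1, hA2, hv]
  simp only [hrem, hw]
  rw [hvaa, hwbb]
  -- the two accumulation loops fold pointwise-equal functions
  have hfun : (fun (result i : Int) =>
        if PySem.Int.mod i (k + 1) == 0 then result + bb else result + aa)
      = (fun (total i : Int) =>
        total + (if PySem.Int.mod i (k + 1) == 0 then bb else aa)) := by
    funext r i
    by_cases h : PySem.Int.mod i (k + 1) == 0 <;> simp [h]
  rw [hfun]
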